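-- pv_equiv track=rewrite | github.com/reinaertvdc/niip | obd/obd2pids.py | parseSupportedPIDs
-- ===== SOURCE A (Python) =====
-- def parseSupportedPIDs(data, start):
-- 	supportedPIDs = []
-- 	byteCounter = start
--
-- 	# Go over every byte in the bytearray
-- 	for tempByte in data:
-- 		# The structure of the bytearray in binary is this:
-- 		# [A, B, C , D]
-- 		# If we represent the bytes in binary we get
-- 		# [A0, A1, A2, ..., A7, B0, B1, ..., D7]
-- 		# If A1 is 1 that means PID start + 0 is supported
-- 		# If A2 is 1 that means PID start + 1 is supported
-- 		# If A8 is 1 that means PID start + 7 is supported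
-- 		# If B0 is 1 that means PID start + 8 is supported
--
-- 		# Create a mask extracting the first bit from left
-- 		mask = 0b10000000
-- 		# Check every bit
-- 		for i in range(8):
-- 			# Do a bitwise check
-- 			supportsPID = (tempByte & mask) == mask
--
-- 			# Add the PID if it's supported
-- 			if supportsPID:
-- 				supportedPIDs.append(byteCounter)
--
-- 			# Increase the byteCounter
-- 			# Shift the bitmask one to the right
-- 			byteCounter += 1
-- 			mask = mask >> 1
--
-- 	return supportedPIDs
-- ===== SOURCE B (Python) =====
-- def parseSupportedPIDs(data, start):
--     out = []
--     for i, byte in enumerate(data):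
--         base = start + 8 * i
--         b = byte & 0xFF
--         hits = []
--         while b:
--             nb = b & (b - 1)          # clear the lowest set bit
--             lsb = b - nb              # the lowest set bit itself
--             hits.append(base + 7 - (lsb.bit_length() - 1))
--             b = nb
--         hits.reverse()                # lsb order is descending PID; A emits ascending
--         out.extend(hits)
--     return out
-- ===== Notes on version B (the rewrite author's own statement) =====
-- stated objective: alternative
-- what changed: Instead of masking through all 8 bits of every byte with a shifting mask and a running counter, B iterates only over the set bits of each byte (clear-lowest-set-bit loop with bit_length), collecting per-byte hits in descending PID order and reversing them, with each byte's base PID computed directly from its enumerate index.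
import Mathlib
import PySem

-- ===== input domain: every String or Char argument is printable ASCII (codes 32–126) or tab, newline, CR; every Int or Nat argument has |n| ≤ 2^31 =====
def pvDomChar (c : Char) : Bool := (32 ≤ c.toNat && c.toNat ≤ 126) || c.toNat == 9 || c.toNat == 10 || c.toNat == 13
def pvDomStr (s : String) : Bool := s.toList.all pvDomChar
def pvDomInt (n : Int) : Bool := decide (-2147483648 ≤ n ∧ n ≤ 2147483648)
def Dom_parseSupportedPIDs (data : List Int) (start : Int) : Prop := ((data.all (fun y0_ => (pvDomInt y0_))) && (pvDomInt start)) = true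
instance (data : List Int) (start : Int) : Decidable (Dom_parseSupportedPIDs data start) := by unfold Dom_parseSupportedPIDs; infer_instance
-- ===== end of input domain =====

-- B visits only the set bits of each byte (clear-lowest-set-bit loop) instead of masking
-- through all 8 bit positions; return values agree on every input (both are total).

-- ===== PORT A =====
-- inner-loop body of A: state is (supportedPIDs, byteCounter, mask)
def pvInnerStep (tempByte : Int) (s : List Int × Int × Int) (_i : Int) : List Int × Int × Int :=
  ((if PySem.Int.band tempByte s.2.2 = s.2.2 then s.1 ++ [s.2.1] else s.1),
   s.2.1 + 1, s.2.2 >>> (1 : Nat))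

-- outer-loop body of A: one byte of data
def pvOuterStep (st : List Int × Int) (tempByte : Int) : List Int × Int :=
  let inner := (PySem.List.pyRange 0 8 1).foldl (pvInnerStep tempByte) (st.1, st.2, (128 : Int))
  (inner.1, inner.2.1)

def parseSupportedPIDs (data : List Int) (start : Int) : List Int :=
  (data.foldl pvOuterStep ([], start)).1

-- ===== PORT B =====
-- the 'while b:' loop of Source B; b is kept as Nat (b = byte & 0xFF is always in 0..255) and the
-- fuel argument (called with fuel = b, which strictly decreases each iteration) only makes the
-- recursion structural — it never cuts the loop short.
def pvLsbLoopFuel : Nat → Int → Nat → List Int → List Int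
  | 0, _, _, hits => hits
  | fuel + 1, base, b, hits =>
    if b = 0 then hits
    else
      let nb := b &&& (b - 1)          -- clear the lowest set bit
      let lsb := b - nb                -- the lowest set bit itself
      pvLsbLoopFuel fuel base nb
        (hits ++ [base + 7 - ((PySem.Int.bitLength (lsb : Int) : Int) - 1)])

-- per-element body of Source B's for loop
def pvAltStep (start : Int) (out : List Int) (p : Int × Int) : List Int :=
  let base := start + 8 * p.1
  let b := (PySem.Int.band p.2 255).toNat
  out ++ (pvLsbLoopFuel b base b []).reverse    -- hits, reversed, extended onto out

def parseSupportedPIDs_alt (data : List Int) (start : Int) : List Int :=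
  (PySem.List.enumerate data 0).foldl (pvAltStep start) []

-- ===== PRECONDITION & SPEC =====
def Spec_parseSupportedPIDs (data : List Int) (start : Int) (out : List Int) : Prop := out = parseSupportedPIDs_alt data start
instance (data : List Int) (start : Int) (out : List Int) : Decidable (Spec_parseSupportedPIDs data start out) := by unfold Spec_parseSupportedPIDs; infer_instance

-- ===== CLAIM (what is proved, stated in full; the proofs are below) =====
def Claim_equal_parseSupportedPIDs : Prop := ∀ (data : List Int) (start : Int), Dom_parseSupportedPIDs data start → Spec_parseSupportedPIDs data start (parseSupportedPIDs data start)

-- ===== LEMMAS AND PROOFS =====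

-- reference: the PID offsets (0..7) contributed by a byte with low 8 bits n, MSB first
def pvBytePattern (n : Nat) : List Int :=
  (if n.testBit 7 then [0] else []) ++ (if n.testBit 6 then [1] else []) ++
  (if n.testBit 5 then [2] else []) ++ (if n.testBit 4 then [3] else []) ++
  (if n.testBit 3 then [4] else []) ++ (if n.testBit 2 then [5] else []) ++
  (if n.testBit 1 then [6] else []) ++ (if n.testBit 0 then [7] else [])

def pvRefGo : List Int → Int → List Int
  | [], _ => []
  | t :: ts, s =>
      (pvBytePattern ((PySem.Int.band t 255).toNat)).map (fun c => s + c) ++ pvRefGo ts (s + 8)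

lemma pv_testBit255 {k : Nat} (hk : k < 8) : (255 : Nat).testBit k = true := by
  interval_cases k <;> decide

lemma pv_and_two_pow_eq {a k : Nat} : (a &&& 2 ^ k = 2 ^ k) ↔ a.testBit k = true := by
  have h2 : 0 < 2 ^ k := Nat.two_pow_pos k
  rw [Nat.and_two_pow]
  cases h : a.testBit k
  · simp
    omega
  · simp

set_option maxRecDepth 8192 in
lemma pv_sub_testBit : ∀ (w : Fin 256) (k : Fin 8), ((255 - w.val).testBit k.val) = !w.val.testBit k.val := by
  decide

lemma pv_toNat255 : (255 : Int).toNat = 255 := rfl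

lemma pv_key (t : Int) (k : Nat) (hk : k < 8) :
    (PySem.Int.band t (2 ^ k) = 2 ^ k) ↔ ((PySem.Int.band t 255).toNat).testBit k = true := by
  have hp : (0:Int) < 2 ^ k := by positivity
  have hc : ((2:Int) ^ k) = ((2 ^ k : Nat) : Int) := by push_cast; ring
  rcases (show 0 ≤ t ∨ t < 0 by omega) with h | h
  · rw [PySem.Int.band_of_nonneg h hp.le, PySem.Int.band_of_nonneg h (by norm_num)]
    rw [hc, Int.toNat_natCast, Int.toNat_natCast, Int.natCast_inj]
    simp only [pv_toNat255]
    rw [Nat.testBit_and, pv_testBit255 hk, Bool.and_true, pv_and_two_pow_eq]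
  · have hb1 : PySem.Int.band t (2 ^ k) =
        ((2 ^ k - (2 ^ k &&& (-t - 1).toNat) : Nat) : Int) := by
      unfold PySem.Int.band
      rw [if_neg (not_le.2 h), if_pos hp.le, hc, Int.toNat_natCast]
    have hb2 : PySem.Int.band t 255 = ((255 - (255 &&& (-t - 1).toNat) : Nat) : Int) := by
      unfold PySem.Int.band
      rw [if_neg (not_le.2 h), if_pos (by norm_num : (0:Int) ≤ 255)]
      simp only [pv_toNat255]
    set u := (-t - 1).toNat with hu
    rw [hb1, hb2, hc, Int.natCast_inj, Int.toNat_natCast]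
    have hle : 2 ^ k &&& u ≤ 2 ^ k := Nat.and_le_left
    have hpn : 0 < 2 ^ k := Nat.two_pow_pos k
    have h1 : (2 ^ k - (2 ^ k &&& u) = 2 ^ k) ↔ (2 ^ k &&& u = 0) := by omega
    have h2 : (2 ^ k &&& u = 0) ↔ u.testBit k = false := by
      rw [Nat.and_comm, Nat.and_two_pow]
      cases hb : u.testBit k <;> simp
    have hw : 255 &&& u ≤ 255 := Nat.and_le_left
    have h3 : (255 - (255 &&& u)).testBit k = !(255 &&& u).testBit k :=
      pv_sub_testBit ⟨255 &&& u, by omega⟩ ⟨k, hk⟩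
    have h4 : (255 &&& u).testBit k = u.testBit k := by
      rw [Nat.testBit_and, pv_testBit255 hk, Bool.true_and]
    rw [h1, h2, h3, h4]
    cases hb : u.testBit k <;> simp

lemma pv_band255_lt (t : Int) : (PySem.Int.band t 255).toNat < 256 := by
  have hA : t.toNat &&& (255:Int).toNat ≤ (255:Int).toNat := Nat.and_le_right
  unfold PySem.Int.band
  split_ifs <;> simp [pv_toNat255] at hA ⊢ <;> omega

-- A's inner loop over the 8 mask positions
set_option maxHeartbeats 2000000 in
lemma pv_innerA (t : Int) (acc : List Int) (bc : Int) :
    (PySem.List.pyRange 0 8 1).foldl (pvInnerStep t) (acc, bc, (128 : Int)) =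
      (acc ++ (pvBytePattern ((PySem.Int.band t 255).toNat)).map (fun c => bc + c), bc + 8, 0) := by
  have hr : PySem.List.pyRange 0 8 1 = [0,1,2,3,4,5,6,7] := by decide
  have k7 := pv_key t 7 (by norm_num)
  rw [show ((2:Int) ^ 7) = 128 from by norm_num] at k7
  have k6 := pv_key t 6 (by norm_num)
  rw [show ((2:Int) ^ 6) = 64 from by norm_num] at k6
  have k5 := pv_key t 5 (by norm_num)
  rw [show ((2:Int) ^ 5) = 32 from by norm_num] at k5
  have k4 := pv_key t 4 (by norm_num)
  rw [show ((2:Int) ^ 4) = 16 from by norm_num] at k4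
  have k3 := pv_key t 3 (by norm_num)
  rw [show ((2:Int) ^ 3) = 8 from by norm_num] at k3
  have k2 := pv_key t 2 (by norm_num)
  rw [show ((2:Int) ^ 2) = 4 from by norm_num] at k2
  have k1 := pv_key t 1 (by norm_num)
  rw [show ((2:Int) ^ 1) = 2 from by norm_num] at k1
  have k0 := pv_key t 0 (by norm_num)
  rw [show ((2:Int) ^ 0) = 1 from by norm_num] at k0
  rw [hr]
  simp only [List.foldl_cons, List.foldl_nil, pvInnerStep,
    (show (128:Int) >>> (1:Nat) = 64 by decide), (show (64:Int) >>> (1:Nat) = 32 by decide),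
    (show (32:Int) >>> (1:Nat) = 16 by decide), (show (16:Int) >>> (1:Nat) = 8 by decide),
    (show (8:Int) >>> (1:Nat) = 4 by decide), (show (4:Int) >>> (1:Nat) = 2 by decide),
    (show (2:Int) >>> (1:Nat) = 1 by decide), (show (1:Int) >>> (1:Nat) = 0 by decide)]
  simp only [k7, k6, k5, k4, k3, k2, k1, k0, pvBytePattern, Prod.mk.injEq]
  refine ⟨?_, by omega, by norm_num⟩
  generalize (PySem.Int.band t 255).toNat.testBit 7 = b7
  generalize (PySem.Int.band t 255).toNat.testBit 6 = b6
  generalize (PySem.Int.band t 255).toNat.testBit 5 = b5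
  generalize (PySem.Int.band t 255).toNat.testBit 4 = b4
  generalize (PySem.Int.band t 255).toNat.testBit 3 = b3
  generalize (PySem.Int.band t 255).toNat.testBit 2 = b2
  generalize (PySem.Int.band t 255).toNat.testBit 1 = b1
  generalize (PySem.Int.band t 255).toNat.testBit 0 = b0
  cases b7 <;> cases b6 <;> cases b5 <;> cases b4 <;> cases b3 <;> cases b2 <;> cases b1 <;> cases b0 <;>
    (simp [List.append_assoc]; try omega)

lemma pv_A_go : ∀ (data : List Int) (acc : List Int) (s : Int),
    (data.foldl pvOuterStep (acc, s)).1 = acc ++ pvRefGo data s := by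
  intro data
  induction data with
  | nil => intro acc s; simp [pvRefGo]
  | cons t ts ih =>
    intro acc s
    rw [List.foldl_cons]
    have hstep : pvOuterStep (acc, s) t
        = (acc ++ (pvBytePattern ((PySem.Int.band t 255).toNat)).map (fun c => s + c), s + 8) := by
      simp only [pvOuterStep, pv_innerA]
    rw [hstep, ih]
    simp [pvRefGo, List.append_assoc]

lemma pv_lsbF_acc : ∀ (fuel : Nat) (base : Int) (b : Nat) (hits : List Int),
    pvLsbLoopFuel fuel base b hits = hits ++ pvLsbLoopFuel fuel base b [] := by
  intro fuel
  induction fuel with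
  | zero => intro base b hits; simp [pvLsbLoopFuel]
  | succ f ih =>
    intro base b hits
    by_cases h : b = 0
    · simp [pvLsbLoopFuel, h]
    · simp only [pvLsbLoopFuel, if_neg h]
      rw [ih _ _ (hits ++ _), ih _ _ ([] ++ _)]
      simp [List.append_assoc]

lemma pv_lsbF_base : ∀ (fuel : Nat) (base : Int) (b : Nat),
    pvLsbLoopFuel fuel base b [] = (pvLsbLoopFuel fuel 0 b []).map (fun c => base + c) := by
  intro fuel
  induction fuel with
  | zero => intro base b; simp [pvLsbLoopFuel]
  | succ f ih =>
    intro base b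
    by_cases h : b = 0
    · simp [pvLsbLoopFuel, h]
    · simp only [pvLsbLoopFuel, if_neg h]
      rw [pv_lsbF_acc f base, pv_lsbF_acc f 0, ih]
      simp
      ring

set_option maxRecDepth 8192 in
lemma pv_byteB_fin : ∀ n : Fin 256, (pvLsbLoopFuel n.val 0 n.val []).reverse = pvBytePattern n.val := by
  decide

lemma pv_byteB (n : Nat) (hn : n < 256) : (pvLsbLoopFuel n 0 n []).reverse = pvBytePattern n :=
  pv_byteB_fin ⟨n, hn⟩

lemma pv_B_go (start : Int) : ∀ (data : List Int) (i : Int) (acc : List Int),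
    (PySem.List.enumerate data i).foldl (pvAltStep start) acc = acc ++ pvRefGo data (start + 8 * i) := by
  intro data
  induction data with
  | nil => intro i acc; simp [PySem.List.enumerate, pvRefGo]
  | cons t ts ih =>
    intro i acc
    rw [PySem.List.enumerate_cons]
    simp only [List.foldl_cons, pvAltStep]
    rw [ih]
    rw [pv_lsbF_base]
    rw [show ∀ (l : List Int) (f : Int → Int), (l.map f).reverse = l.reverse.map f from
      fun l f => by simp]
    rw [pv_byteB _ (pv_band255_lt t)]
    simp only [pvRefGo, List.append_assoc]
    have h8 : start + 8 * (i + 1) = start + 8 * i + 8 := by ring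
    rw [h8]

-- ===== VERDICT (by name: the statement is the Claim_ definition above) =====
theorem parseSupportedPIDs_spec : Claim_equal_parseSupportedPIDs := by
  intro data start _
  unfold Spec_parseSupportedPIDs parseSupportedPIDs parseSupportedPIDs_alt
  rw [pv_A_go data [] start]
  have := pv_B_go start data 0 []
  simp at this ⊢
  rw [this]
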